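-- pv_equiv track=rewrite | github.com/timpark0807/self-taught-swe | Algorithms/Leetcode/1182 - Shortest Distance to Target Color.py | processColors
-- ===== SOURCE A (Python) =====
-- def processColors(colors):
--     left = [{i:-1 for i in range(1, 4)} for _ in range(len(colors))]
--     right = [{i:-1 for i in range(1, 4)} for _ in range(len(colors))]
--
--     for index, color in enumerate(colors):
--         left[index][color] = 0
--         right[index][color] = 0
--
--     for index in range(1, len(colors)):
--         for color in range(1, 4):
--             if colors[index] != color and left[index-1][color] != -1:
--                 left[index][color] = left[index-1][color] + 1
--
--     for index in reversed(range(len(colors)-1)):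
--         for color in range(1, 4):
--             if colors[index] != color and right[index+1][color] != -1:
--                 right[index][color] = right[index+1][color] + 1
--     return left, right
-- ===== SOURCE B (Python) =====
-- def processColors(colors):
--     # Last-seen-position sweeps: each row is rendered from a 'last occurrence'
--     # table instead of propagating counters between rows.
--     n = len(colors)
--
--     def render(last, index, sign):
--         row = {}
--         for color in (1, 2, 3):
--             p = last[color]
--             row[color] = -1 if p == -1 else sign * (p - index)
--         row[colors[index]] = 0
--         return row
--
--     left = []
--     last = {1: -1, 2: -1, 3: -1}
--     for index in range(n):
--         last[colors[index]] = index
--         left.append(render(last, index, -1))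
--
--     right = []
--     last = {1: -1, 2: -1, 3: -1}
--     for index in reversed(range(n)):
--         last[colors[index]] = index
--         right.append(render(last, index, 1))
--     right.reverse()
--     return left, right
-- ===== Notes on version B (the rewrite author's own statement) =====
-- stated objective: alternative
-- what changed: Replaces the counter-propagating DP (each row built from the previous row's distance counters, with a separate zero-initialisation pass) by two independent last-seen-position sweeps that render each row directly as index-minus-last-occurrence from a 3-entry last table.
import Mathlib
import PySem

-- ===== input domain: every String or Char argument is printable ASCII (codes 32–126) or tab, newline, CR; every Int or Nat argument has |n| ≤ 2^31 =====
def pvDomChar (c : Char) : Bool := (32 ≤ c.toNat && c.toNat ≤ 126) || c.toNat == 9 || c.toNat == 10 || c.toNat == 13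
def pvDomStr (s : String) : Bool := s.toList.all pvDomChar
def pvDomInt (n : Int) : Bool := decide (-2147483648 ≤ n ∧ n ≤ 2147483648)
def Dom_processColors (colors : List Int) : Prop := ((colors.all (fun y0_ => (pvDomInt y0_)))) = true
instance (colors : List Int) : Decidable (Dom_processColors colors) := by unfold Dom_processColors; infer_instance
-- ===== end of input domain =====

-- B replaces A's counter-propagating DP over neighbouring rows by two independent
-- last-seen-position sweeps that render each row directly (alternative decomposition, same cost).

-- ===== PORT A =====

-- {i: -1 for i in range(1, 4)}
def pvInitRow : PySem.Dict Int Int :=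
  (PySem.List.pyRange 1 4 1).foldl (fun d i => d.insert i (-1)) (PySem.Dict.mk [])

-- rows[i]  (every use has 0 ≤ i < len(rows), so the default is never hit)
def pvRowAt (rows : List (PySem.Dict Int Int)) (i : Int) : PySem.Dict Int Int :=
  rows.getD i.toNat (PySem.Dict.mk [])

-- rows[i][c] = v  (every use has 0 ≤ i < len(rows))
def pvSetAt (rows : List (PySem.Dict Int Int)) (i : Int) (c v : Int) :
    List (PySem.Dict Int Int) :=
  rows.set i.toNat ((pvRowAt rows i).insert c v)

def processColors (colors : List Int) :
    (List (List (Int × Int))) × (List (List (Int × Int))) :=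
  let n : Int := (colors.length : Int)
  -- left = [{i: -1 for i in range(1, 4)} for _ in range(len(colors))]; right likewise
  let left0 := (PySem.List.pyRange 0 n 1).map (fun _ => pvInitRow)
  let right0 := (PySem.List.pyRange 0 n 1).map (fun _ => pvInitRow)
  -- for index, color in enumerate(colors): left[index][color] = 0; right[index][color] = 0
  let st := (PySem.List.enumerate colors).foldl
    (fun (st : List (PySem.Dict Int Int) × List (PySem.Dict Int Int)) p =>
      (pvSetAt st.1 p.1 p.2 0, pvSetAt st.2 p.1 p.2 0)) (left0, right0)
  -- for index in range(1, len(colors)): for color in range(1, 4): ...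
  -- left[index-1][color] is read with [] on a key provably present (init rows carry 1..3):
  -- ported as .getD color (-1), exact here.
  let left2 := (PySem.List.pyRange 1 n 1).foldl (fun L index =>
    (PySem.List.pyRange 1 4 1).foldl (fun L color =>
      if PySem.List.pyGetD colors index 0 ≠ color ∧
          (pvRowAt L (index - 1)).getD color (-1) ≠ -1 then
        pvSetAt L index color ((pvRowAt L (index - 1)).getD color (-1) + 1)
      else L) L) st.1
  -- for index in reversed(range(len(colors) - 1)): for color in range(1, 4): ...
  let right2 := ((PySem.List.pyRange 0 (n - 1) 1).reverse).foldl (fun R index =>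
    (PySem.List.pyRange 1 4 1).foldl (fun R color =>
      if PySem.List.pyGetD colors index 0 ≠ color ∧
          (pvRowAt R (index + 1)).getD color (-1) ≠ -1 then
        pvSetAt R index color ((pvRowAt R (index + 1)).getD color (-1) + 1)
      else R) R) st.2
  (left2.map (·.items), right2.map (·.items))

-- ===== PORT B =====

-- render(last, index, sign): {c: -1 if last[c] == -1 else sign*(last[c]-index) for c in (1,2,3)},
-- then row[colors[index]] = 0
def pvRender (last : PySem.Dict Int Int) (colors : List Int) (index sign : Int) :
    PySem.Dict Int Int :=
  let row := ([(1 : Int), 2, 3]).foldl (fun row c =>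
    let p := last.getD c (-1)
    row.insert c (if p = -1 then -1 else sign * (p - index))) (PySem.Dict.mk [])
  row.insert (PySem.List.pyGetD colors index 0) 0

-- last = {1: -1, 2: -1, 3: -1}
def pvLast0 : PySem.Dict Int Int := PySem.Dict.mk [(1, -1), (2, -1), (3, -1)]

def processColors_alt (colors : List Int) :
    (List (List (Int × Int))) × (List (List (Int × Int))) :=
  let n : Int := (colors.length : Int)
  -- forward sweep: for index in range(n): last[colors[index]] = index; left.append(render(...))
  let fwd := (PySem.List.pyRange 0 n 1).foldl
    (fun (st : PySem.Dict Int Int × List (PySem.Dict Int Int)) index =>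
      let last := st.1.insert (PySem.List.pyGetD colors index 0) index
      (last, st.2 ++ [pvRender last colors index (-1)])) (pvLast0, [])
  -- backward sweep: for index in reversed(range(n)): ...; right.reverse() at the end
  let bwd := ((PySem.List.pyRange 0 n 1).reverse).foldl
    (fun (st : PySem.Dict Int Int × List (PySem.Dict Int Int)) index =>
      let last := st.1.insert (PySem.List.pyGetD colors index 0) index
      (last, st.2 ++ [pvRender last colors index 1])) (pvLast0, [])
  (fwd.2.map (·.items), (bwd.2.reverse).map (·.items))

-- ===== PRECONDITION & SPEC =====

def Spec_processColors (colors : List Int)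
    (out : (List (List (Int × Int))) × (List (List (Int × Int)))) : Prop :=
  out = processColors_alt colors
instance (colors : List Int) (out : (List (List (Int × Int))) × (List (List (Int × Int)))) :
    Decidable (Spec_processColors colors out) := by unfold Spec_processColors; infer_instance

-- ===== CLAIM (what is proved, stated in full; the proofs are below) =====
def Claim_equal_processColors : Prop :=
  ∀ (colors : List Int), Dom_processColors colors →
    Spec_processColors colors (processColors colors)

-- ===== LEMMAS AND PROOFS =====

-- distance (≥ 0) from the head of l to the first occurrence of c, -1 if absent
def pvFirstIdx : List Int → Int → Int
  | [], _ => -1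
  | x :: xs, c =>
    if x = c then 0 else (if pvFirstIdx xs c = -1 then -1 else pvFirstIdx xs c + 1)

-- left distance at position k; right distance at position i
def pvDL (colors : List Int) (k : Nat) (c : Int) : Int :=
  pvFirstIdx ((colors.take (k + 1)).reverse) c
def pvDR (colors : List Int) (i : Nat) (c : Int) : Int :=
  pvFirstIdx (colors.drop i) c

def pvRowL (colors : List Int) (k : Nat) : PySem.Dict Int Int :=
  (PySem.Dict.mk [(1, pvDL colors k 1), (2, pvDL colors k 2), (3, pvDL colors k 3)]).insert
    (colors.getD k 0) 0
def pvRowR (colors : List Int) (k : Nat) : PySem.Dict Int Int :=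
  (PySem.Dict.mk [(1, pvDR colors k 1), (2, pvDR colors k 2), (3, pvDR colors k 3)]).insert
    (colors.getD k 0) 0

def pvSetupRow (colors : List Int) (j : Nat) : PySem.Dict Int Int :=
  pvInitRow.insert (colors.getD j 0) 0

def pvRowGet (L : List (PySem.Dict Int Int)) (j : Nat) : PySem.Dict Int Int :=
  L.getD j (PySem.Dict.mk [])

-- the dict-valued "position of last/next occurrence" held by B's last tables
def pvPosL (colors : List Int) : Nat → Int → Int
  | 0, _ => -1
  | Nat.succ m, c => if pvDL colors m c = -1 then -1 else (m : Int) - pvDL colors m c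
def pvPosR (colors : List Int) (i : Nat) (c : Int) : Int :=
  if pvDR colors i c = -1 then -1 else (i : Int) + pvDR colors i c

lemma pvInitRow_eq : pvInitRow = PySem.Dict.mk [(1, -1), (2, -1), (3, -1)] := by decide

lemma pvFirstIdx_lt (l : List Int) (c : Int) : pvFirstIdx l c < (l.length : Int) := by
  induction l with
  | nil => norm_num [pvFirstIdx]
  | cons x xs ih =>
    simp only [pvFirstIdx, List.length_cons]
    push_cast
    split_ifs <;> omega

lemma pvFirstIdx_ge (l : List Int) (c : Int) : -1 ≤ pvFirstIdx l c := by
  induction l with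
  | nil => simp [pvFirstIdx]
  | cons x xs ih => simp only [pvFirstIdx]; split_ifs <;> omega

lemma pvDL_zero (colors : List Int) (c : Int) (h : 0 < colors.length) :
    pvDL colors 0 c = if colors.getD 0 0 = c then 0 else -1 := by
  cases colors with
  | nil => simp at h
  | cons x xs => simp [pvDL, pvFirstIdx]

lemma pvDL_succ (colors : List Int) (k : Nat) (c : Int) (h : k + 1 < colors.length) :
    pvDL colors (k + 1) c =
      if colors.getD (k + 1) 0 = c then 0
      else (if pvDL colors k c = -1 then -1 else pvDL colors k c + 1) := by
  have ht : colors.take (k + 2) = colors.take (k + 1) ++ [colors.getD (k + 1) 0] := by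
    rw [List.take_add_one]
    have h2 : colors[k + 1]? = some (colors.getD (k + 1) 0) := by
      rw [List.getD_eq_getElem _ _ h]
      exact List.getElem?_eq_getElem h
    rw [h2]
    rfl
  show pvFirstIdx ((colors.take (k + 2)).reverse) c = _
  rw [ht, List.reverse_append, List.reverse_singleton, List.singleton_append, pvFirstIdx]
  rfl

lemma pvDL_self (colors : List Int) (k : Nat) (c : Int) (h : k < colors.length)
    (hc : colors.getD k 0 = c) : pvDL colors k c = 0 := by
  cases k with
  | zero => rw [pvDL_zero _ _ h, if_pos hc]
  | succ m => rw [pvDL_succ _ _ _ h, if_pos hc]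

lemma pvDL_le (colors : List Int) (k : Nat) (c : Int) (h : k < colors.length) :
    pvDL colors k c ≤ (k : Int) := by
  have hlen : ((colors.take (k + 1)).reverse).length = k + 1 := by
    rw [List.length_reverse, List.length_take]; omega
  have := pvFirstIdx_lt ((colors.take (k + 1)).reverse) c
  rw [hlen] at this
  unfold pvDL
  push_cast at this ⊢
  omega

lemma pvDR_nil (colors : List Int) (i : Nat) (c : Int) (h : colors.length ≤ i) :
    pvDR colors i c = -1 := by
  unfold pvDR
  rw [List.drop_eq_nil_of_le h]
  rfl

lemma pvDR_cons (colors : List Int) (i : Nat) (c : Int) (h : i < colors.length) :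
    pvDR colors i c =
      if colors.getD i 0 = c then 0
      else (if pvDR colors (i + 1) c = -1 then -1 else pvDR colors (i + 1) c + 1) := by
  have hd : colors.drop i = colors.getD i 0 :: colors.drop (i + 1) := by
    rw [List.getD_eq_getElem _ _ h]
    exact List.drop_eq_getElem_cons h
  simp only [pvDR, hd, pvFirstIdx]

lemma pvDR_self (colors : List Int) (i : Nat) (c : Int) (h : i < colors.length)
    (hc : colors.getD i 0 = c) : pvDR colors i c = 0 := by
  rw [pvDR_cons _ _ _ h, if_pos hc]

lemma pvDR_ge (colors : List Int) (i : Nat) (c : Int) : -1 ≤ pvDR colors i c :=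
  pvFirstIdx_ge _ _

lemma pvDL_ge (colors : List Int) (k : Nat) (c : Int) : -1 ≤ pvDL colors k c :=
  pvFirstIdx_ge _ _

-- getD on the spec rows
lemma getD_pvRowL (colors : List Int) (k : Nat) (c : Int) (hk : k < colors.length)
    (hc : c = 1 ∨ c = 2 ∨ c = 3) :
    (pvRowL colors k).getD c (-1) = pvDL colors k c := by
  unfold pvRowL
  by_cases hx : c = colors.getD k 0
  · rw [PySem.Dict.getD_insert, if_pos hx]
    exact (pvDL_self colors k c hk hx.symm).symm
  · rw [PySem.Dict.getD_insert, if_neg hx]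
    rcases hc with h | h | h <;> subst h <;>
      simp [PySem.Dict.getD_eq_get?_getD, PySem.Dict.get?_mk_cons]

lemma getD_pvRowR (colors : List Int) (k : Nat) (c : Int) (hk : k < colors.length)
    (hc : c = 1 ∨ c = 2 ∨ c = 3) :
    (pvRowR colors k).getD c (-1) = pvDR colors k c := by
  unfold pvRowR
  by_cases hx : c = colors.getD k 0
  · rw [PySem.Dict.getD_insert, if_pos hx]
    exact (pvDR_self colors k c hk hx.symm).symm
  · rw [PySem.Dict.getD_insert, if_neg hx]
    rcases hc with h | h | h <;> subst h <;>
      simp [PySem.Dict.getD_eq_get?_getD, PySem.Dict.get?_mk_cons]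

-- position-table step lemmas
lemma pvLast0_getD (c : Int) : pvLast0.getD c (-1) = -1 := by
  unfold pvLast0
  simp only [PySem.Dict.getD_eq_get?_getD, PySem.Dict.get?_mk_cons]
  split_ifs <;> rfl

lemma pvPosL_step (colors : List Int) (k : Nat) (c : Int) (hk : k < colors.length) :
    pvPosL colors (k + 1) c = if c = colors.getD k 0 then (k : Int) else pvPosL colors k c := by
  by_cases hc : c = colors.getD k 0
  · rw [if_pos hc]
    show (if pvDL colors k c = -1 then -1 else (k : Int) - pvDL colors k c) = (k : Int)
    rw [pvDL_self colors k c hk hc.symm]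
    norm_num
  · rw [if_neg hc]
    cases k with
    | zero =>
      have h0 : pvDL colors 0 c = -1 := by
        rw [pvDL_zero _ _ hk, if_neg (fun h => hc h.symm)]
      show (if pvDL colors 0 c = -1 then -1 else (0 : Int) - pvDL colors 0 c) = -1
      rw [h0]
      norm_num
    | succ m =>
      have h1 : pvDL colors (m + 1) c
          = if pvDL colors m c = -1 then -1 else pvDL colors m c + 1 := by
        rw [pvDL_succ _ _ _ hk, if_neg (fun h => hc h.symm)]
      have hge := pvDL_ge colors m c
      show (if pvDL colors (m + 1) c = -1 then -1 else ((m + 1 : Nat) : Int) - pvDL colors (m + 1) c)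
        = (if pvDL colors m c = -1 then -1 else (m : Int) - pvDL colors m c)
      rw [h1]
      split_ifs <;> push_cast <;> omega

lemma pvPosR_step (colors : List Int) (i : Nat) (c : Int) (hi : i < colors.length) :
    pvPosR colors i c = if c = colors.getD i 0 then (i : Int) else pvPosR colors (i + 1) c := by
  unfold pvPosR
  by_cases hc : c = colors.getD i 0
  · rw [if_pos hc, pvDR_self colors i c hi hc.symm]
    norm_num
  · have h1 : pvDR colors i c
        = if pvDR colors (i + 1) c = -1 then -1 else pvDR colors (i + 1) c + 1 := by
      rw [pvDR_cons _ _ _ hi, if_neg (fun h => hc h.symm)]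
    have hge := pvDR_ge colors (i + 1) c
    rw [if_neg hc, h1]
    split_ifs <;> push_cast <;> omega

lemma pvRenderL (colors : List Int) (k : Nat) (hk : k < colors.length)
    (last : PySem.Dict Int Int)
    (hlast : ∀ c, last.getD c (-1) = pvPosL colors (k + 1) c) :
    pvRender last colors (k : Int) (-1) = pvRowL colors k := by
  have hv : ∀ c : Int,
      (if last.getD c (-1) = -1 then (-1 : Int) else (-1) * (last.getD c (-1) - (k : Int)))
        = pvDL colors k c := by
    intro c
    have hP : pvPosL colors (k + 1) c
        = if pvDL colors k c = -1 then -1 else (k : Int) - pvDL colors k c := rfl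
    rw [hlast c, hP]
    have hge := pvDL_ge colors k c
    have hle := pvDL_le colors k c hk
    by_cases hdl : pvDL colors k c = -1
    · simp [hdl]
    · rw [if_neg hdl, if_neg (by omega)]
      omega
  unfold pvRender
  simp only [List.foldl]
  rw [hv 1, hv 2, hv 3, PySem.List.pyGetD_natCast]
  rfl

lemma pvRenderR (colors : List Int) (i : Nat) (_hi : i < colors.length)
    (last : PySem.Dict Int Int)
    (hlast : ∀ c, last.getD c (-1) = pvPosR colors i c) :
    pvRender last colors (i : Int) 1 = pvRowR colors i := by
  have hv : ∀ c : Int,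
      (if last.getD c (-1) = -1 then (-1 : Int) else 1 * (last.getD c (-1) - (i : Int)))
        = pvDR colors i c := by
    intro c
    rw [hlast c]
    unfold pvPosR
    have hge := pvDR_ge colors i c
    by_cases hdl : pvDR colors i c = -1
    · simp [hdl]
    · rw [if_neg hdl, if_neg (by omega)]
      omega
  unfold pvRender
  simp only [List.foldl]
  rw [hv 1, hv 2, hv 3, PySem.List.pyGetD_natCast]
  rfl

lemma pvDictIns (x d1 d2 d3 : Int) (h1 : x ≠ 1 → d1 = -1) (h2 : x ≠ 2 → d2 = -1)
    (h3 : x ≠ 3 → d3 = -1) :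
    (PySem.Dict.mk [((1 : Int), (-1 : Int)), (2, -1), (3, -1)]).insert x 0
      = (PySem.Dict.mk [(1, d1), (2, d2), (3, d3)]).insert x 0 := by
  by_cases hx1 : x = 1
  · subst hx1
    rw [h2 (by norm_num), h3 (by norm_num)]
    rfl
  · by_cases hx2 : x = 2
    · subst hx2
      rw [h1 (by norm_num), h3 (by norm_num)]
      rfl
    · by_cases hx3 : x = 3
      · subst hx3
        rw [h1 (by norm_num), h2 (by norm_num)]
        rfl
      · rw [h1 hx1, h2 hx2, h3 hx3]

lemma pvDictTrans (x : Int) (f : Int → Int) :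
    ([1, 2, 3] : List Int).foldl
      (fun r c => if x ≠ c ∧ f c ≠ -1 then r.insert c (f c + 1) else r)
      ((PySem.Dict.mk [(1, -1), (2, -1), (3, -1)]).insert x 0)
    = (PySem.Dict.mk
        [(1, if x = 1 then 0 else (if f 1 = -1 then -1 else f 1 + 1)),
         (2, if x = 2 then 0 else (if f 2 = -1 then -1 else f 2 + 1)),
         (3, if x = 3 then 0 else (if f 3 = -1 then -1 else f 3 + 1))]).insert x 0 := by
  simp only [List.foldl]
  by_cases hx1 : x = 1
  · subst hx1
    by_cases hf2 : f 2 = -1 <;> by_cases hf3 : f 3 = -1 <;>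
      simp [hf2, hf3, PySem.Dict.insert, PySem.Dict.contains]
  · by_cases hx2 : x = 2
    · subst hx2
      by_cases hf1 : f 1 = -1 <;> by_cases hf3 : f 3 = -1 <;>
        simp [hf1, hf3, PySem.Dict.insert, PySem.Dict.contains]
    · by_cases hx3 : x = 3
      · subst hx3
        by_cases hf1 : f 1 = -1 <;> by_cases hf2 : f 2 = -1 <;>
          simp [hf1, hf2, PySem.Dict.insert, PySem.Dict.contains]
      · have e1 : (1 : Int) ≠ x := Ne.symm hx1
        have e2 : (2 : Int) ≠ x := Ne.symm hx2
        have e3 : (3 : Int) ≠ x := Ne.symm hx3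
        by_cases hf1 : f 1 = -1 <;> by_cases hf2 : f 2 = -1 <;> by_cases hf3 : f 3 = -1 <;>
          simp [hf1, hf2, hf3, hx1, hx2, hx3, e1, e2, e3, PySem.Dict.insert,
            PySem.Dict.contains, beq_iff_eq]

-- boundary rows coincide with setup rows
lemma pvRow0 (colors : List Int) (h : 0 < colors.length) :
    pvSetupRow colors 0 = pvRowL colors 0 := by
  unfold pvSetupRow pvRowL
  rw [pvInitRow_eq]
  exact pvDictIns _ _ _ _
    (fun hc => by rw [pvDL_zero _ _ h, if_neg (fun hh => hc hh)])
    (fun hc => by rw [pvDL_zero _ _ h, if_neg (fun hh => hc hh)])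
    (fun hc => by rw [pvDL_zero _ _ h, if_neg (fun hh => hc hh)])

lemma pvRowLast (colors : List Int) (h : 0 < colors.length) :
    pvSetupRow colors (colors.length - 1) = pvRowR colors (colors.length - 1) := by
  have hlt : colors.length - 1 < colors.length := by omega
  have hnil : pvDR colors (colors.length - 1 + 1) = fun c => -1 := by
    funext c
    exact pvDR_nil colors _ c (by omega)
  have hdr : ∀ c : Int, colors.getD (colors.length - 1) 0 ≠ c →
      pvDR colors (colors.length - 1) c = -1 := by
    intro c hc
    rw [pvDR_cons _ _ _ hlt, if_neg (fun hh => hc hh)]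
    have := congrFun hnil c
    rw [this]
    norm_num
  unfold pvSetupRow pvRowR
  rw [pvInitRow_eq]
  exact pvDictIns _ _ _ _ (fun hc => hdr 1 hc) (fun hc => hdr 2 hc) (fun hc => hdr 3 hc)

-- the inner for-color loop at dict level
lemma pvRowTransL (colors : List Int) (k : Nat) (hk1 : 1 ≤ k) (hkn : k < colors.length) :
    ([1, 2, 3] : List Int).foldl
      (fun r c => if colors.getD k 0 ≠ c ∧ pvDL colors (k - 1) c ≠ -1
        then r.insert c (pvDL colors (k - 1) c + 1) else r)
      (pvSetupRow colors k) = pvRowL colors k := by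
  have hs : ∀ c : Int, pvDL colors k c
      = if colors.getD k 0 = c then 0
        else (if pvDL colors (k - 1) c = -1 then -1 else pvDL colors (k - 1) c + 1) := by
    intro c
    have h2 := pvDL_succ colors (k - 1) c (by omega)
    rw [show k - 1 + 1 = k from by omega] at h2
    exact h2
  unfold pvSetupRow pvRowL
  rw [pvInitRow_eq]
  have ht := pvDictTrans (colors.getD k 0) (fun c => pvDL colors (k - 1) c)
  simp only at ht
  rw [ht, ← hs 1, ← hs 2, ← hs 3]

lemma pvRowTransR (colors : List Int) (k : Nat) (hk : k + 1 < colors.length) :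
    ([1, 2, 3] : List Int).foldl
      (fun r c => if colors.getD k 0 ≠ c ∧ pvDR colors (k + 1) c ≠ -1
        then r.insert c (pvDR colors (k + 1) c + 1) else r)
      (pvSetupRow colors k) = pvRowR colors k := by
  have hs : ∀ c : Int, pvDR colors k c
      = if colors.getD k 0 = c then 0
        else (if pvDR colors (k + 1) c = -1 then -1 else pvDR colors (k + 1) c + 1) :=
    fun c => pvDR_cons colors k c (by omega)
  unfold pvSetupRow pvRowR
  rw [pvInitRow_eq]
  have ht := pvDictTrans (colors.getD k 0) (fun c => pvDR colors (k + 1) c)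
  simp only at ht
  rw [ht, ← hs 1, ← hs 2, ← hs 3]

-- pvSetAt / pvRowGet bookkeeping
lemma pvSetAt_length (L : List (PySem.Dict Int Int)) (i : Int) (c v : Int) :
    (pvSetAt L i c v).length = L.length := by
  simp [pvSetAt]

lemma pvRowGet_pvSetAt_self (L : List (PySem.Dict Int Int)) (i : Nat) (c v : Int)
    (h : i < L.length) :
    pvRowGet (pvSetAt L (i : Int) c v) i = (pvRowGet L i).insert c v := by
  unfold pvRowGet pvSetAt pvRowAt
  rw [Int.toNat_natCast]
  rw [List.getD_eq_getElem?_getD, List.getElem?_set_self (by simpa using h)]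
  rfl

lemma pvRowGet_pvSetAt_ne (L : List (PySem.Dict Int Int)) (i j : Nat) (c v : Int)
    (h : j ≠ i) :
    pvRowGet (pvSetAt L (i : Int) c v) j = pvRowGet L j := by
  unfold pvRowGet pvSetAt pvRowAt
  rw [Int.toNat_natCast]
  rw [List.getD_eq_getElem?_getD, List.getElem?_set_ne (fun hh => h hh.symm),
    ← List.getD_eq_getElem?_getD]

lemma pvRowAt_cast_sub (k : Nat) (hk : 1 ≤ k) (L : List (PySem.Dict Int Int)) :
    pvRowAt L ((k : Int) - 1) = pvRowGet L (k - 1) := by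
  have h2 : ((k : Int) - 1).toNat = k - 1 := by omega
  unfold pvRowAt pvRowGet
  rw [h2]

lemma pvRowAt_cast_add (i : Nat) (L : List (PySem.Dict Int Int)) :
    pvRowAt L ((i : Int) + 1) = pvRowGet L (i + 1) := by
  have h2 : ((i : Int) + 1).toNat = i + 1 := by omega
  unfold pvRowAt pvRowGet
  rw [h2]

-- the inner for-color loop at list level: only row i changes, driven by the frozen row t
lemma pvInnerA (x : Int) (i t : Nat) (hne : t ≠ i) (cs : List Int) :
    ∀ L : List (PySem.Dict Int Int), i < L.length →
    ((cs.foldl (fun L c =>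
        if x ≠ c ∧ (pvRowGet L t).getD c (-1) ≠ -1
        then pvSetAt L (i : Int) c ((pvRowGet L t).getD c (-1) + 1) else L) L).length = L.length
    ∧ ∀ j : Nat, pvRowGet (cs.foldl (fun L c =>
        if x ≠ c ∧ (pvRowGet L t).getD c (-1) ≠ -1
        then pvSetAt L (i : Int) c ((pvRowGet L t).getD c (-1) + 1) else L) L) j
      = if j = i
        then cs.foldl (fun r c =>
          if x ≠ c ∧ (pvRowGet L t).getD c (-1) ≠ -1
          then r.insert c ((pvRowGet L t).getD c (-1) + 1) else r) (pvRowGet L i)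
        else pvRowGet L j) := by
  induction cs with
  | nil =>
    intro L hL
    refine ⟨rfl, fun j => ?_⟩
    split_ifs with hj
    · subst hj; rfl
    · rfl
  | cons c cs ih =>
    intro L hL
    by_cases hc : x ≠ c ∧ (pvRowGet L t).getD c (-1) ≠ -1
    · have hlen1 : (pvSetAt L (i : Int) c ((pvRowGet L t).getD c (-1) + 1)).length = L.length :=
        pvSetAt_length _ _ _ _
      obtain ⟨ih1, ih2⟩ := ih (pvSetAt L (i : Int) c ((pvRowGet L t).getD c (-1) + 1))
        (by rw [hlen1]; exact hL)
      have ht1 : pvRowGet (pvSetAt L (i : Int) c ((pvRowGet L t).getD c (-1) + 1)) t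
          = pvRowGet L t := pvRowGet_pvSetAt_ne _ _ _ _ _ hne
      have hi1 : pvRowGet (pvSetAt L (i : Int) c ((pvRowGet L t).getD c (-1) + 1)) i
          = (pvRowGet L i).insert c ((pvRowGet L t).getD c (-1) + 1) :=
        pvRowGet_pvSetAt_self _ _ _ _ hL
      simp only [List.foldl, if_pos hc]
      constructor
      · rw [ih1, hlen1]
      · intro j
        rw [ih2 j]
        simp only [ht1, hi1]
        split_ifs with hj
        · rfl
        · exact pvRowGet_pvSetAt_ne _ _ _ _ _ hj
    · obtain ⟨ih1, ih2⟩ := ih L hL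
      simp only [List.foldl, if_neg hc]
      exact ⟨ih1, fun j => by rw [ih2 j]⟩

-- the setup loop
def pvSetup (rows : List (PySem.Dict Int Int)) (s : Nat) : List Int → List (PySem.Dict Int Int)
  | [] => rows
  | x :: xs => pvSetup (pvSetAt rows (s : Int) x 0) (s + 1) xs

lemma pvEnumFoldl_setup (xs : List Int) (s : Nat) (rows : List (PySem.Dict Int Int)) :
    (PySem.List.enumerate xs (s : Int)).foldl (fun r p => pvSetAt r p.1 p.2 0) rows
      = pvSetup rows s xs := by
  induction xs generalizing s rows with
  | nil => rfl
  | cons x xs ih =>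
    rw [PySem.List.enumerate_cons]
    show List.foldl _ (pvSetAt rows (s : Int) x 0) _ = _
    rw [show ((s : Int) + 1) = ((s + 1 : Nat) : Int) from by push_cast; ring, ih]
    rfl

lemma pvSetup_length (xs : List Int) (s : Nat) (rows : List (PySem.Dict Int Int)) :
    (pvSetup rows s xs).length = rows.length := by
  induction xs generalizing s rows with
  | nil => rfl
  | cons x xs ih => rw [pvSetup, ih, pvSetAt_length]

lemma pvRowGet_pvSetup (xs : List Int) (s : Nat) (rows : List (PySem.Dict Int Int))
    (j : Nat) (hj : j < rows.length) :
    pvRowGet (pvSetup rows s xs) j =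
      if s ≤ j ∧ j < s + xs.length
      then (pvRowGet rows j).insert (xs.getD (j - s) 0) 0
      else pvRowGet rows j := by
  induction xs generalizing s rows with
  | nil =>
    simp only [pvSetup, List.length_nil]
    rw [if_neg (by omega)]
  | cons x xs ih =>
    rw [pvSetup, ih _ _ (by rw [pvSetAt_length]; exact hj)]
    by_cases hjs : j = s
    · subst hjs
      rw [if_neg (by omega), if_pos (by simp only [List.length_cons]; omega)]
      rw [pvRowGet_pvSetAt_self _ _ _ _ hj]
      simp
    · by_cases hj2 : s + 1 ≤ j ∧ j < s + 1 + xs.length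
      · rw [if_pos hj2, if_pos (by simp only [List.length_cons]; omega)]
        rw [pvRowGet_pvSetAt_ne _ _ _ _ _ hjs]
        congr 1
        have : j - s = (j - (s + 1)) + 1 := by omega
        rw [this]
        rfl
      · rw [if_neg hj2, if_neg (by simp only [List.length_cons]; omega)]
        exact pvRowGet_pvSetAt_ne _ _ _ _ _ hjs

lemma pvFoldlPair {α β γ : Type} (l : List γ) (f : α → γ → α) (g : β → γ → β) (a : α) (b : β) :
    l.foldl (fun st p => (f st.1 p, g st.2 p)) (a, b) = (l.foldl f a, l.foldl g b) := by
  induction l generalizing a b with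
  | nil => rfl
  | cons x xs ih => simp [List.foldl, ih]

lemma pvRange14 : PySem.List.pyRange 1 4 1 = [1, 2, 3] := by decide

lemma pvInitRows_length (n : Int) :
    ((PySem.List.pyRange 0 n 1).map (fun _ => pvInitRow)).length = n.toNat := by
  simp [PySem.List.length_pyRange_one]

lemma pvRowGet_initRows (n : Int) (j : Nat) (hj : (j : Int) < n) :
    pvRowGet ((PySem.List.pyRange 0 n 1).map (fun _ => pvInitRow)) j = pvInitRow := by
  unfold pvRowGet
  rw [List.getD_eq_getElem?_getD, List.getElem?_map]
  have hj2 : j < (PySem.List.pyRange 0 n 1).length := by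
    rw [PySem.List.length_pyRange_one]; omega
  rw [List.getElem?_eq_getElem hj2]
  rfl

-- A's forward loop
lemma pvFwdA (colors : List Int) (S : List (PySem.Dict Int Int))
    (hSlen : S.length = colors.length)
    (hS : ∀ j : Nat, j < colors.length → pvRowGet S j = pvSetupRow colors j)
    (k : Nat) (hk1 : 1 ≤ k) (hkn : k ≤ colors.length) :
    ((PySem.List.pyRange 1 (k : Int) 1).foldl (fun L index =>
      (PySem.List.pyRange 1 4 1).foldl (fun L color =>
        if PySem.List.pyGetD colors index 0 ≠ color ∧
            (pvRowAt L (index - 1)).getD color (-1) ≠ -1 then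
          pvSetAt L index color ((pvRowAt L (index - 1)).getD color (-1) + 1)
        else L) L) S).length = colors.length
    ∧ ∀ j : Nat, j < colors.length →
      pvRowGet ((PySem.List.pyRange 1 (k : Int) 1).foldl (fun L index =>
        (PySem.List.pyRange 1 4 1).foldl (fun L color =>
          if PySem.List.pyGetD colors index 0 ≠ color ∧
              (pvRowAt L (index - 1)).getD color (-1) ≠ -1 then
            pvSetAt L index color ((pvRowAt L (index - 1)).getD color (-1) + 1)
          else L) L) S) j
      = if j < k then pvRowL colors j else pvSetupRow colors j := by
  revert hkn
  induction k, hk1 using Nat.le_induction with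
  | base =>
    intro hkn
    rw [show ((1 : Nat) : Int) = 1 from rfl, PySem.List.pyRange_one_eq_nil le_rfl]
    simp only [List.foldl]
    refine ⟨hSlen, fun j hj => ?_⟩
    split_ifs with h1
    · have hj0 : j = 0 := by omega
      subst hj0
      rw [hS 0 hj]
      exact pvRow0 colors (by omega)
    · exact hS j hj
  | succ k hk1 ih =>
    intro hkn
    obtain ⟨ihlen, ihget⟩ := ih (by omega)
    rw [show ((k + 1 : Nat) : Int) = (k : Int) + 1 from by push_cast; ring,
      PySem.List.pyRange_one_succ_right (by exact_mod_cast hk1), List.foldl_append]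
    simp only [List.foldl]
    simp only [PySem.List.pyGetD_natCast, pvRowAt_cast_sub k hk1]
    have ihL := fun (j : Nat) (hjk : j < k) (hj : j < colors.length) =>
      (ihget j hj).trans (if_pos hjk)
    have ihS := fun (j : Nat) (hjk : ¬ j < k) (hj : j < colors.length) =>
      (ihget j hj).trans (if_neg hjk)
    obtain ⟨h1, h2⟩ := pvInnerA (colors.getD k 0) k (k - 1) (by omega)
      (PySem.List.pyRange 1 4 1) _ (by rw [ihlen]; omega)
    refine ⟨by rw [h1, ihlen], fun j hj => ?_⟩
    rw [h2 j]
    by_cases hji : j = k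
    · subst hji
      rw [if_pos rfl, if_pos (by omega)]
      rw [ihL (j - 1) (by omega) (by omega), ihS j (by omega) hj, pvRange14]
      rw [PySem.List.foldl_congr_mem [1, 2, 3]
        (fun r c => if colors.getD j 0 ≠ c ∧ (pvRowL colors (j - 1)).getD c (-1) ≠ -1
          then r.insert c ((pvRowL colors (j - 1)).getD c (-1) + 1) else r)
        (fun r c => if colors.getD j 0 ≠ c ∧ pvDL colors (j - 1) c ≠ -1
          then r.insert c (pvDL colors (j - 1) c + 1) else r)
        (pvSetupRow colors j)
        (fun acc c hc => by
          simp only [getD_pvRowL colors (j - 1) c (by omega) (by simpa using hc)])]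
      exact pvRowTransL colors j hk1 (by omega)
    · rw [if_neg hji, ihget j hj]
      by_cases hjk : j < k
      · rw [if_pos hjk, if_pos (by omega)]
      · rw [if_neg hjk, if_neg (by omega)]

-- A's backward loop, processing indices len-2 … i
lemma pvBwdA (colors : List Int) (S : List (PySem.Dict Int Int))
    (hSlen : S.length = colors.length)
    (hS : ∀ j : Nat, j < colors.length → pvRowGet S j = pvSetupRow colors j)
    (hn : 1 ≤ colors.length) (m : Nat) (hm : m ≤ colors.length - 1) :
    (((PySem.List.pyRange ((colors.length - 1 - m : Nat) : Int) ((colors.length : Int) - 1) 1).reverse).foldl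
      (fun R index =>
      (PySem.List.pyRange 1 4 1).foldl (fun R color =>
        if PySem.List.pyGetD colors index 0 ≠ color ∧
            (pvRowAt R (index + 1)).getD color (-1) ≠ -1 then
          pvSetAt R index color ((pvRowAt R (index + 1)).getD color (-1) + 1)
        else R) R) S).length = colors.length
    ∧ ∀ j : Nat, j < colors.length →
      pvRowGet (((PySem.List.pyRange ((colors.length - 1 - m : Nat) : Int) ((colors.length : Int) - 1) 1).reverse).foldl
        (fun R index =>
        (PySem.List.pyRange 1 4 1).foldl (fun R color =>
          if PySem.List.pyGetD colors index 0 ≠ color ∧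
              (pvRowAt R (index + 1)).getD color (-1) ≠ -1 then
            pvSetAt R index color ((pvRowAt R (index + 1)).getD color (-1) + 1)
          else R) R) S) j
      = if colors.length - 1 - m ≤ j then pvRowR colors j else pvSetupRow colors j := by
  revert hm
  induction m with
  | zero =>
    intro hm
    rw [show (((colors.length - 1 - 0 : Nat)) : Int) = (colors.length : Int) - 1 from by omega,
      PySem.List.pyRange_one_eq_nil le_rfl, List.reverse_nil]
    simp only [List.foldl]
    refine ⟨hSlen, fun j hj => ?_⟩
    split_ifs with h1
    · have hj1 : j = colors.length - 1 := by omega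
      subst hj1
      rw [hS _ hj]
      exact pvRowLast colors (by omega)
    · exact hS j hj
  | succ m ih =>
    intro hm
    obtain ⟨ihlen, ihget⟩ := ih (by omega)
    have ihR := fun (j : Nat) (h1 : colors.length - 1 - m ≤ j) (h2 : j < colors.length) =>
      (ihget j h2).trans (if_pos h1)
    have ihS2 := fun (j : Nat) (h1 : ¬ colors.length - 1 - m ≤ j) (h2 : j < colors.length) =>
      (ihget j h2).trans (if_neg h1)
    rw [PySem.List.pyRange_one_cons
        (show (((colors.length - 1 - (m + 1) : Nat)) : Int) < (colors.length : Int) - 1 from by omega),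
      show (((colors.length - 1 - (m + 1) : Nat)) : Int) + 1
          = ((colors.length - 1 - m : Nat) : Int) from by omega,
      List.reverse_cons, List.foldl_append]
    simp only [List.foldl]
    simp only [PySem.List.pyGetD_natCast, pvRowAt_cast_add (colors.length - 1 - (m + 1))]
    obtain ⟨h1, h2⟩ := pvInnerA (colors.getD (colors.length - 1 - (m + 1)) 0)
      (colors.length - 1 - (m + 1)) (colors.length - 1 - (m + 1) + 1) (by omega)
      (PySem.List.pyRange 1 4 1) _ (by rw [ihlen]; omega)
    refine ⟨by rw [h1, ihlen], fun j hj => ?_⟩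
    rw [h2 j]
    by_cases hji : j = colors.length - 1 - (m + 1)
    · rw [if_pos hji, if_pos (by omega), ← hji]
      rw [ihR (j + 1) (by omega) (by omega), ihS2 j (by omega) (by omega), pvRange14]
      rw [PySem.List.foldl_congr_mem [1, 2, 3]
        (fun r c => if colors.getD j 0 ≠ c ∧ (pvRowR colors (j + 1)).getD c (-1) ≠ -1
          then r.insert c ((pvRowR colors (j + 1)).getD c (-1) + 1) else r)
        (fun r c => if colors.getD j 0 ≠ c ∧ pvDR colors (j + 1) c ≠ -1
          then r.insert c (pvDR colors (j + 1) c + 1) else r)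
        (pvSetupRow colors j)
        (fun acc c hc => by
          simp only [getD_pvRowR colors (j + 1) c (by omega) (by simpa using hc)])]
      exact pvRowTransR colors j (by omega)
    · rw [if_neg hji, ihget j hj]
      by_cases hjk : colors.length - 1 - m ≤ j
      · rw [if_pos hjk, if_pos (by omega)]
      · rw [if_neg hjk, if_neg (by omega)]

-- B's forward sweep
lemma pvFwdB (colors : List Int) (k : Nat) (hk : k ≤ colors.length) :
    ∃ d, (PySem.List.pyRange 0 (k : Int) 1).foldl
      (fun (st : PySem.Dict Int Int × List (PySem.Dict Int Int)) index =>
        let last := st.1.insert (PySem.List.pyGetD colors index 0) index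
        (last, st.2 ++ [pvRender last colors index (-1)])) (pvLast0, [])
      = (d, (List.range k).map (pvRowL colors))
    ∧ ∀ c, d.getD c (-1) = pvPosL colors k c := by
  revert hk
  induction k with
  | zero =>
    intro hk
    refine ⟨pvLast0, ?_, fun c => pvLast0_getD c⟩
    rw [show ((0 : Nat) : Int) = 0 from rfl, PySem.List.pyRange_one_eq_nil le_rfl]
    rfl
  | succ k ih =>
    intro hk
    obtain ⟨d, hfold, hd⟩ := ih (by omega)
    have hlast : ∀ c, (d.insert (colors.getD k 0) (k : Int)).getD c (-1)
        = pvPosL colors (k + 1) c := by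
      intro c
      rw [PySem.Dict.getD_insert, hd c, ← pvPosL_step colors k c (by omega)]
    refine ⟨d.insert (colors.getD k 0) (k : Int), ?_, fun c => hlast c⟩
    rw [show ((k + 1 : Nat) : Int) = (k : Int) + 1 from by push_cast; ring,
      PySem.List.pyRange_one_succ_right (by exact_mod_cast Nat.zero_le k),
      List.foldl_append, hfold]
    simp only [List.foldl, PySem.List.pyGetD_natCast]
    rw [List.range_succ, List.map_append]
    rw [pvRenderL colors k (by omega) _ hlast]
    rfl

-- B's backward sweep, processing indices len-1 … len-m
lemma pvBwdB (colors : List Int) (m : Nat) (hm : m ≤ colors.length) :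
    ∃ d, ((PySem.List.pyRange ((colors.length - m : Nat) : Int) (colors.length : Int) 1).reverse).foldl
      (fun (st : PySem.Dict Int Int × List (PySem.Dict Int Int)) index =>
        let last := st.1.insert (PySem.List.pyGetD colors index 0) index
        (last, st.2 ++ [pvRender last colors index 1])) (pvLast0, [])
      = (d, ((List.range' (colors.length - m) m).map (pvRowR colors)).reverse)
    ∧ ∀ c, d.getD c (-1) = pvPosR colors (colors.length - m) c := by
  revert hm
  induction m with
  | zero =>
    intro hm
    refine ⟨pvLast0, ?_, fun c => ?_⟩
    · rw [show (((colors.length - 0 : Nat)) : Int) = (colors.length : Int) from by omega,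
        PySem.List.pyRange_one_eq_nil le_rfl, List.reverse_nil]
      rfl
    · rw [pvLast0_getD c]
      unfold pvPosR
      rw [pvDR_nil colors _ c (by omega)]
      norm_num
  | succ m ih =>
    intro hm
    obtain ⟨d, hfold, hd⟩ := ih (by omega)
    have hlast : ∀ c, (d.insert (colors.getD (colors.length - (m + 1)) 0)
          ((colors.length - (m + 1) : Nat) : Int)).getD c (-1)
        = pvPosR colors (colors.length - (m + 1)) c := by
      intro c
      rw [PySem.Dict.getD_insert, pvPosR_step colors (colors.length - (m + 1)) c (by omega),
        show colors.length - (m + 1) + 1 = colors.length - m from by omega, hd c]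
    refine ⟨_, ?_, fun c => hlast c⟩
    rw [PySem.List.pyRange_one_cons
        (show (((colors.length - (m + 1) : Nat)) : Int) < (colors.length : Int) from by omega),
      show (((colors.length - (m + 1) : Nat)) : Int) + 1
          = ((colors.length - m : Nat) : Int) from by omega,
      List.reverse_cons, List.foldl_append, hfold]
    simp only [List.foldl, PySem.List.pyGetD_natCast]
    rw [pvRenderR colors (colors.length - (m + 1)) (by omega) _ hlast]
    rw [List.range'_succ, show colors.length - (m + 1) + 1 = colors.length - m from by omega,
      List.map_cons, List.reverse_cons]

lemma pvListEq (T : List (PySem.Dict Int Int)) (n : Nat) (f : Nat → PySem.Dict Int Int)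
    (hlen : T.length = n) (h : ∀ j : Nat, j < n → pvRowGet T j = f j) :
    T = (List.range n).map f := by
  apply List.ext_getElem
  · simp [hlen]
  · intro j h1 h2
    have hj : j < n := by simpa [hlen] using h1
    have := h j hj
    unfold pvRowGet at this
    rw [List.getD_eq_getElem?_getD, List.getElem?_eq_getElem h1] at this
    simpa using this

lemma pvSetupPair (l : List (Int × Int))
    (a b : List (PySem.Dict Int Int)) :
    l.foldl (fun st p => (pvSetAt st.1 p.1 p.2 0, pvSetAt st.2 p.1 p.2 0)) (a, b)
      = (l.foldl (fun r p => pvSetAt r p.1 p.2 0) a, l.foldl (fun r p => pvSetAt r p.1 p.2 0) b) :=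
  pvFoldlPair l (fun r p => pvSetAt r p.1 p.2 0) (fun r p => pvSetAt r p.1 p.2 0) a b

lemma pvEnumFoldl_setup0 (xs : List Int) (rows : List (PySem.Dict Int Int)) :
    (PySem.List.enumerate xs).foldl (fun r p => pvSetAt r p.1 p.2 0) rows
      = pvSetup rows 0 xs := by
  have := pvEnumFoldl_setup xs 0 rows
  simpa using this

-- ===== VERDICT (by name: the statement is the Claim_ definition above) =====
theorem processColors_spec : Claim_equal_processColors := by
  intro colors _
  unfold Spec_processColors
  by_cases hn0 : colors.length = 0
  · have hnil : colors = [] := List.length_eq_zero_iff.mp hn0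
    subst hnil
    rfl
  · have hn : 1 ≤ colors.length := by omega
    unfold processColors processColors_alt
    dsimp only
    rw [pvSetupPair, pvEnumFoldl_setup0]
    dsimp only
    have hlen0 : ((PySem.List.pyRange 0 (colors.length : Int) 1).map (fun _ => pvInitRow)).length
        = colors.length := by
      rw [pvInitRows_length]
      omega
    have hSlen : (pvSetup ((PySem.List.pyRange 0 (colors.length : Int) 1).map
        (fun _ => pvInitRow)) 0 colors).length = colors.length := by
      rw [pvSetup_length, hlen0]
    have hS : ∀ j : Nat, j < colors.length →
        pvRowGet (pvSetup ((PySem.List.pyRange 0 (colors.length : Int) 1).map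
          (fun _ => pvInitRow)) 0 colors) j = pvSetupRow colors j := by
      intro j hj
      rw [pvRowGet_pvSetup colors 0 _ j (by rw [hlen0]; exact hj),
        if_pos ⟨Nat.zero_le j, by omega⟩,
        pvRowGet_initRows _ j (by exact_mod_cast hj), Nat.sub_zero]
      rfl
    obtain ⟨hAlen, hAget⟩ := pvFwdA colors _ hSlen hS colors.length hn le_rfl
    have hAleft := pvListEq _ colors.length (pvRowL colors) hAlen
      (fun j hj => (hAget j hj).trans (if_pos hj))
    have hB := pvBwdA colors _ hSlen hS hn (colors.length - 1) le_rfl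
    simp only [Nat.sub_self, Nat.cast_zero] at hB
    obtain ⟨hBlen, hBget⟩ := hB
    have hAright := pvListEq _ colors.length (pvRowR colors) hBlen
      (fun j hj => (hBget j hj).trans (if_pos (Nat.zero_le j)))
    rw [hAleft, hAright]
    obtain ⟨dF, hFfold, _⟩ := pvFwdB colors colors.length le_rfl
    obtain ⟨dB, hBfold, _⟩ := pvBwdB colors colors.length le_rfl
    simp only [Nat.sub_self, Nat.cast_zero] at hFfold hBfold
    rw [hFfold, hBfold]
    simp only [List.reverse_reverse, ← List.range_eq_range']
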